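-- pv_equiv track=rewrite | github.com/destifo/Competitive-Programming | C. Cypher/Cypher.py | decypher
-- ===== SOURCE A (Python) =====
-- def decypher(moves: str) -> int:
--     tot_shift = 0
--     for ch in moves:
--         if ch == 'D':
--             tot_shift +=1
--         else:
--             tot_shift -=1
--
--     return tot_shift
-- ===== SOURCE B (Python) =====
-- def decypher(moves: str) -> int:
--     # Divide and conquer: the net shift of a string is the sum of the net
--     # shifts of its two halves; a single char contributes +1 for 'D', else -1.
--     if len(moves) == 0:
--         return 0
--     if len(moves) == 1:
--         return 1 if moves == 'D' else -1
--     mid = len(moves) // 2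
--     return decypher(moves[:mid]) + decypher(moves[mid:])
-- ===== Notes on version B (the rewrite author's own statement) =====
-- stated objective: alternative
-- what changed: Replaced A's left-to-right accumulator loop by a divide-and-conquer recursion: split the string in half, recurse on both halves, and add the two net shifts, with base cases for the empty and one-character string.
import Mathlib
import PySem

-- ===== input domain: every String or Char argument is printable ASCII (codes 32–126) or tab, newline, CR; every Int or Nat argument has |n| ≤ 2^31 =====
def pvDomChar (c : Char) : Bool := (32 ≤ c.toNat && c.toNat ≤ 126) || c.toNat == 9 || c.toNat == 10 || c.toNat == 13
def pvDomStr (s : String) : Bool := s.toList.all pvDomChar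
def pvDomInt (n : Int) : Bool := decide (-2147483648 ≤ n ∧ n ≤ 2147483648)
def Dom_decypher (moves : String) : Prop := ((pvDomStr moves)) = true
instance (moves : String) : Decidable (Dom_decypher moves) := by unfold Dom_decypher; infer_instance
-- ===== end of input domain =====

-- B replaces A's accumulator loop by a divide-and-conquer recursion on the two halves (alternative decomposition).

-- ===== PORT A =====
def decypher (moves : String) : Int :=
  moves.toList.foldl (fun tot_shift ch => if ch == 'D' then tot_shift + 1 else tot_shift - 1) 0

-- ===== PORT B =====
-- moves[:mid] / moves[mid:] with 0 ≤ mid ≤ len are exactly take/drop.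
def decypherGo (l : List Char) : Int :=
  if l.length = 0 then 0
  else if l.length = 1 then (if l = ['D'] then 1 else -1)
  else decypherGo (l.take (l.length / 2)) + decypherGo (l.drop (l.length / 2))
termination_by l.length
decreasing_by
  · simp only [List.length_take]
    omega
  · simp only [List.length_drop]
    omega

def decypher_alt (moves : String) : Int := decypherGo moves.toList

-- ===== PRECONDITION & SPEC =====
def Spec_decypher (moves : String) (out : Int) : Prop := out = decypher_alt moves
instance (moves : String) (out : Int) : Decidable (Spec_decypher moves out) := by unfold Spec_decypher; infer_instance

-- ===== CLAIM (what is proved, stated in full; the proofs are below) =====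
def Claim_equal_decypher : Prop := ∀ (moves : String), Dom_decypher moves → Spec_decypher moves (decypher moves)

-- ===== LEMMAS AND PROOFS =====

def charVal (c : Char) : Int := if c = 'D' then 1 else -1

lemma foldl_shift (l : List Char) (a : Int) :
    l.foldl (fun tot_shift ch => if ch == 'D' then tot_shift + 1 else tot_shift - 1) a
      = a + (l.map charVal).sum := by
  induction l generalizing a with
  | nil => simp
  | cons c t ih =>
    rw [List.foldl_cons, ih]
    by_cases hc : c = 'D' <;> simp [charVal, hc] <;> ring

lemma decypherGo_eq_sum_aux (n : Nat) :
    ∀ l : List Char, l.length ≤ n → decypherGo l = (l.map charVal).sum := by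
  induction n with
  | zero =>
    intro l h
    rw [decypherGo]
    simp [List.length_eq_zero_iff.mp (Nat.le_zero.mp h)]
  | succ n ih =>
    intro l h
    rw [decypherGo]
    split_ifs with h0 h1 hD
    · simp [List.length_eq_zero_iff.mp h0]
    · subst hD; simp [charVal]
    · obtain ⟨c, hc⟩ := List.length_eq_one_iff.mp h1
      subst hc
      have hcD : c ≠ 'D' := fun h => hD (by rw [h])
      simp [charVal, hcD]
    · rw [ih _ (by simp [List.length_take]; omega), ih _ (by simp [List.length_drop]; omega)]
      rw [← List.sum_append, ← List.map_append, List.take_append_drop]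

lemma decypherGo_eq_sum (l : List Char) : decypherGo l = (l.map charVal).sum :=
  decypherGo_eq_sum_aux l.length l le_rfl

-- ===== VERDICT (by name: the statement is the Claim_ definition above) =====
theorem decypher_spec : Claim_equal_decypher := by
  intro moves _
  unfold Spec_decypher decypher decypher_alt
  rw [foldl_shift, decypherGo_eq_sum]
  simp
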